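-- pv_equiv track=rewrite | github.com/mistakeknot/Skaffen | scripts/ci/generate_parity_evidence.py | strip_rust_comments
-- ===== SOURCE A (Python) =====
-- def strip_rust_comments(line: str, in_block_comment: bool) -> tuple[str, bool]:
--     """Strip Rust line/block comments while preserving non-comment code."""
--     i = 0
--     out = []
--     while i < len(line):
--         if in_block_comment:
--             end = line.find("*/", i)
--             if end == -1:
--                 return ("".join(out), True)
--             i = end + 2
--             in_block_comment = False
--             continue
--
--         if line.startswith("//", i):
--             break
--         if line.startswith("/*", i):
--             in_block_comment = True
--             i += 2
--             continue
--
--         out.append(line[i])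
--         i += 1
--
--     return ("".join(out), in_block_comment)
-- ===== SOURCE B (Python) =====
-- def strip_rust_comments(line: str, in_block_comment: bool) -> tuple[str, bool]:
--     """Strip Rust line/block comments by jumping between markers with find()."""
--     out = []
--     i = 0
--     while True:
--         if in_block_comment:
--             end = line.find("*/", i)
--             if end == -1:
--                 return ("".join(out), True)
--             i = end + 2
--             in_block_comment = False
--             continue
--         lc = line.find("//", i)
--         bc = line.find("/*", i)
--         if bc == -1 or (lc != -1 and lc < bc):
--             out.append(line[i:] if lc == -1 else line[i:lc])
--             return ("".join(out), False)
--         out.append(line[i:bc])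
--         i = bc + 2
--         in_block_comment = True
-- ===== Notes on version B (the rewrite author's own statement) =====
-- stated objective: faster
-- what changed: A copies the line character by character, testing startswith at every index; B instead locates the next '//' or '/*' marker with find() and copies whole slices between markers, jumping from marker to marker.
import Mathlib
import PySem

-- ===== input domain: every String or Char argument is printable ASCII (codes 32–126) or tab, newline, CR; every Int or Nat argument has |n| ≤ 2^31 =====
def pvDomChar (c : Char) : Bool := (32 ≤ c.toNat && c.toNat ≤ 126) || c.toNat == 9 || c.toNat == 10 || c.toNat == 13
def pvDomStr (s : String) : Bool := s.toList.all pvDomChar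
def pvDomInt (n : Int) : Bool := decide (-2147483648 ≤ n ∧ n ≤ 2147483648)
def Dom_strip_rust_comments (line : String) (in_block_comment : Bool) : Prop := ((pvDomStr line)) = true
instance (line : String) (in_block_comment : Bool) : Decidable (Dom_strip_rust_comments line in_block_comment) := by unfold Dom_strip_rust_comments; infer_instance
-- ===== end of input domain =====

-- B replaces A's per-character scan (startswith at every index) by marker-to-marker jumps with
-- find(), copying whole slices between markers (constant-factor faster: C-level find/slicing
-- instead of a per-character Python loop).

-- line.find(sub, i) with a Nat start index (shared thin wrapper over the PySem primitive)
def pvFind (s : List Char) (sub : List Char) (i : Nat) : Int :=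
  PySem.Chars.findFrom s sub (i : Int) none

-- find with a start index past the end of the string returns -1 (CPython's rule)
theorem pvFind_of_len_lt (s sub : List Char) (i : Nat) (h : s.length < i) :
    pvFind s sub i = -1 := by
  simp only [pvFind, PySem.Chars.findFrom]
  rw [if_pos]
  exact_mod_cast h

-- a successful find result is at least the start index
theorem pvFind_ge (s sub : List Char) (i : Nat) (h : pvFind s sub i ≠ -1) :
    (i : Int) ≤ pvFind s sub i := by
  by_cases hi : i ≤ s.length
  · exact (PySem.Chars.findFrom_natCast_spec s sub i hi h).1
  · exact absurd (pvFind_of_len_lt s sub i (by omega)) h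

-- ===== PORT A =====
-- A's while loop: index i, accumulated output chars, block-comment state.
def pvLoopA (s : List Char) (i : Nat) (out : List Char) (blk : Bool) : List Char × Bool :=
  if hlt : i < s.length then
    if blk then
      if pvFind s ['*', '/'] i = -1 then (out, true)
      else pvLoopA s ((pvFind s ['*', '/'] i).toNat + 2) out false
    else if PySem.Chars.startswith (s.drop i) ['/', '/'] then (out, blk)
         -- line.startswith("//", i) is exactly: "//" is a prefix of line[i:]
    else if PySem.Chars.startswith (s.drop i) ['/', '*'] then pvLoopA s (i + 2) out true
    else pvLoopA s (i + 1) (out ++ [s[i]]) blk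
  else (out, blk)
termination_by s.length + 1 - i
decreasing_by
  · have h1 : (i : Int) ≤ pvFind s ['*', '/'] i := pvFind_ge _ _ _ (by assumption)
    have h2 : i ≤ (pvFind s ['*', '/'] i).toNat := by omega
    omega
  · omega
  · omega

def strip_rust_comments (line : String) (in_block_comment : Bool) : String × Bool :=
  let r := pvLoopA line.toList 0 [] in_block_comment
  (String.ofList r.1, r.2)

-- ===== PORT B =====
-- B's while loop: jump to the next marker found by find(), copy the slice before it.
def pvLoopB (s : List Char) (i : Nat) (out : List Char) (blk : Bool) : List Char × Bool :=
  if blk then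
    if pvFind s ['*', '/'] i = -1 then (out, true)
    else pvLoopB s ((pvFind s ['*', '/'] i).toNat + 2) out false
  else if pvFind s ['/', '*'] i = -1 ∨
          (pvFind s ['/', '/'] i ≠ -1 ∧ pvFind s ['/', '/'] i < pvFind s ['/', '*'] i) then
    (out ++ (if pvFind s ['/', '/'] i = -1 then PySem.Chars.slice s (some (i : Int)) none
             else PySem.Chars.slice s (some (i : Int)) (some (pvFind s ['/', '/'] i))), false)
  else
    pvLoopB s ((pvFind s ['/', '*'] i).toNat + 2)
      (out ++ PySem.Chars.slice s (some (i : Int)) (some (pvFind s ['/', '*'] i))) true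
termination_by s.length + 1 - i
decreasing_by
  · have hne : pvFind s ['*', '/'] i ≠ -1 := by assumption
    have h1 : (i : Int) ≤ pvFind s ['*', '/'] i := pvFind_ge _ _ _ hne
    have hle : i ≤ s.length := by
      by_contra hgt
      exact hne (pvFind_of_len_lt s _ i (by omega))
    have h2 : i ≤ (pvFind s ['*', '/'] i).toNat := by omega
    omega
  · have hne : pvFind s ['/', '*'] i ≠ -1 := by
      rename_i hc; intro h; exact hc (Or.inl h)
    have h1 : (i : Int) ≤ pvFind s ['/', '*'] i := pvFind_ge _ _ _ hne
    have hle : i ≤ s.length := by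
      by_contra hgt
      exact hne (pvFind_of_len_lt s _ i (by omega))
    have h2 : i ≤ (pvFind s ['/', '*'] i).toNat := by omega
    omega

def strip_rust_comments_alt (line : String) (in_block_comment : Bool) : String × Bool :=
  let r := pvLoopB line.toList 0 [] in_block_comment
  (String.ofList r.1, r.2)

-- ===== PRECONDITION & SPEC =====
def Spec_strip_rust_comments (line : String) (in_block_comment : Bool) (out : String × Bool) : Prop := out = strip_rust_comments_alt line in_block_comment
instance (line : String) (in_block_comment : Bool) (out : String × Bool) : Decidable (Spec_strip_rust_comments line in_block_comment out) := by unfold Spec_strip_rust_comments; infer_instance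

-- ===== CLAIM (what is proved, stated in full; the proofs are below) =====
def Claim_equal_strip_rust_comments : Prop := ∀ (line : String) (in_block_comment : Bool), Dom_strip_rust_comments line in_block_comment → Spec_strip_rust_comments line in_block_comment (strip_rust_comments line in_block_comment)

-- ===== LEMMAS AND PROOFS =====

-- find's result characterisation, specialised to pvFind (cites the PySem spec lemmas)
theorem pvFind_spec (s sub : List Char) (i : Nat) (hi : i ≤ s.length) (h : pvFind s sub i ≠ -1) :
    (i : Int) ≤ pvFind s sub i ∧ sub <+: s.drop (pvFind s sub i).toNat ∧
      ∀ j, i ≤ j → j < (pvFind s sub i).toNat → ¬ sub <+: s.drop j :=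
  PySem.Chars.findFrom_natCast_spec s sub i hi h

theorem pvFind_neg_iff (s sub : List Char) (i : Nat) (hi : i ≤ s.length) :
    pvFind s sub i = -1 ↔ ¬ sub <:+: s.drop i :=
  PySem.Chars.findFrom_natCast_eq_neg_one_iff s sub i hi

-- find of a nonempty needle starting at or past the end returns -1
theorem pvFind_of_len_le (s sub : List Char) (i : Nat) (hsub : sub ≠ []) (h : s.length ≤ i) :
    pvFind s sub i = -1 := by
  by_cases hlt : s.length < i
  · exact pvFind_of_len_lt s sub i hlt
  · have hi : i = s.length := by omega
    subst hi
    rw [pvFind_neg_iff s sub s.length le_rfl]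
    simp [List.drop_length, hsub]

-- a "/*" prefix excludes a "//" prefix of the same list
theorem pvNotBoth {l : List Char} (h : ['/', '*'] <+: l) : ¬ ['/', '/'] <+: l := by
  obtain ⟨t, rfl⟩ := h
  simp [List.cons_prefix_cons]

-- a slice line[i:e] with a nonnegative end bound, as take/drop (cites the PySem slice lemmas)
theorem pvSliceEq (s : List Char) (i : Nat) (e : Int) (he : (i : Int) ≤ e) :
    PySem.Chars.slice s (some (i : Int)) (some e) = (s.drop i).take (e.toNat - i) := by
  have hcast : e = ((e.toNat : Nat) : Int) := by omega
  conv_lhs => rw [hcast]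
  simp only [PySem.Chars.slice_eq_listSlice, PySem.List.slice_natCast]

-- past the end, both loops return the state unchanged
theorem pvLoopA_ge (s : List Char) (i : Nat) (out : List Char) (blk : Bool)
    (h : s.length ≤ i) : pvLoopA s i out blk = (out, blk) := by
  rw [pvLoopA, dif_neg (by omega)]

theorem pvLoopB_ge (s : List Char) (i : Nat) (out : List Char) (blk : Bool)
    (h : s.length ≤ i) : pvLoopB s i out blk = (out, blk) := by
  have h1 : pvFind s ['*', '/'] i = -1 := pvFind_of_len_le s _ i (by simp) h
  have h2 : pvFind s ['/', '*'] i = -1 := pvFind_of_len_le s _ i (by simp) h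
  have h3 : pvFind s ['/', '/'] i = -1 := pvFind_of_len_le s _ i (by simp) h
  cases blk with
  | true => rw [pvLoopB]; simp [h1]
  | false =>
      rw [pvLoopB]
      simp only [Bool.false_eq_true, if_false, h1, h2, h3]
      simp [PySem.Chars.slice_eq_listSlice, PySem.List.slice_from_natCast,
            List.drop_eq_nil_of_le h]

-- a marker prefix at j ≥ i is a marker infix of line[i:]
theorem pvPrefix_infix {sub s : List Char} {i j : Nat} (hij : i ≤ j)
    (h : sub <+: s.drop j) : sub <:+: s.drop i := by
  have hd : s.drop j = (s.drop i).drop (j - i) := by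
    rw [List.drop_drop]; congr 1; omega
  rw [hd] at h
  exact h.isInfix.trans (List.drop_suffix _ _).isInfix

-- A copies characters one by one across a marker-free stretch [i, m)
theorem pvCopyA (s : List Char) (m : Nat) (hm : m ≤ s.length) :
    ∀ n i out, i + n = m →
    (∀ j, i ≤ j → j < m → ¬(['/', '/'] <+: s.drop j) ∧ ¬(['/', '*'] <+: s.drop j)) →
    pvLoopA s i out false = pvLoopA s m (out ++ (s.drop i).take (m - i)) false := by
  intro n
  induction n with
  | zero =>
      intro i out h0 _
      have : i = m := by omega
      subst this
      simp
  | succ n ih =>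
      intro i out h0 hfree
      have hlt : i < s.length := by omega
      have h1 : ¬ (PySem.Chars.startswith (s.drop i) ['/', '/'] = true) := by
        rw [PySem.Chars.startswith_iff]
        exact (hfree i le_rfl (by omega)).1
      have h2 : ¬ (PySem.Chars.startswith (s.drop i) ['/', '*'] = true) := by
        rw [PySem.Chars.startswith_iff]
        exact (hfree i le_rfl (by omega)).2
      rw [pvLoopA, dif_pos hlt]
      simp only [Bool.false_eq_true, if_false, if_neg h1, if_neg h2]
      rw [ih (i + 1) (out ++ [s[i]'hlt]) (by omega)
            (fun j hj hjm => hfree j (by omega) hjm)]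
      congr 1
      rw [List.append_assoc]
      congr 1
      rw [List.drop_eq_getElem_cons hlt]
      have hmi : m - i = (m - (i + 1)) + 1 := by omega
      rw [hmi, List.take_succ_cons, List.singleton_append]

-- with no marker anywhere in line[i:], A copies the whole tail and stops
theorem pvNoMarkA (s : List Char) (i : Nat) (out : List Char)
    (h : ∀ j, i ≤ j → ¬(['/', '/'] <+: s.drop j) ∧ ¬(['/', '*'] <+: s.drop j)) :
    pvLoopA s i out false = (out ++ s.drop i, false) := by
  by_cases hi : i ≤ s.length
  · rw [pvCopyA s s.length le_rfl (s.length - i) i out (by omega)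
        (fun j hj hjm => h j hj)]
    rw [pvLoopA_ge s s.length _ false le_rfl]
    congr 2
    exact List.take_of_length_le (by simp)
  · rw [pvLoopA_ge s i out false (by omega)]
    simp [List.drop_eq_nil_of_le (by omega : s.length ≤ i)]

-- main loop equivalence
theorem pvLoop_eq (s : List Char) :
    ∀ k i out blk, s.length + 1 - i ≤ k → pvLoopA s i out blk = pvLoopB s i out blk := by
  intro k
  induction k with
  | zero =>
      intro i out blk hk
      rw [pvLoopA_ge s i out blk (by omega), pvLoopB_ge s i out blk (by omega)]
  | succ k ih =>
      intro i out blk hk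
      by_cases hge : s.length ≤ i
      · rw [pvLoopA_ge s i out blk hge, pvLoopB_ge s i out blk hge]
      have hlt : i < s.length := by omega
      have hi : i ≤ s.length := by omega
      cases blk with
      | true =>
          rw [pvLoopA, dif_pos hlt, pvLoopB]
          by_cases he : pvFind s ['*', '/'] i = -1
          · simp [he]
          · simp only [if_neg he]
            have hg := pvFind_ge s ['*', '/'] i he
            exact ih _ out false (by omega)
      | false =>
          rw [pvLoopB]
          simp only [Bool.false_eq_true, if_false]
          by_cases hbc : pvFind s ['/', '*'] i = -1
          · by_cases hlc : pvFind s ['/', '/'] i = -1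
            · -- no marker at all in line[i:]
              rw [if_pos (Or.inl hbc), if_pos hlc]
              have hnb := (pvFind_neg_iff s ['/', '*'] i hi).mp hbc
              have hnl := (pvFind_neg_iff s ['/', '/'] i hi).mp hlc
              rw [pvNoMarkA s i out
                  (fun j hj => ⟨fun hp => hnl (pvPrefix_infix hj hp),
                                fun hp => hnb (pvPrefix_infix hj hp)⟩)]
              simp [PySem.Chars.slice_eq_listSlice, PySem.List.slice_from_natCast]
            · -- only a line comment: stop at lc
              obtain ⟨hgel, hprel, hminl⟩ := pvFind_spec s ['/', '/'] i hi hlc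
              have hnb := (pvFind_neg_iff s ['/', '*'] i hi).mp hbc
              have hlen2 : (pvFind s ['/', '/'] i).toNat + 2 ≤ s.length := by
                have := hprel.length_le
                simp [List.length_drop] at this
                omega
              rw [pvCopyA s (pvFind s ['/', '/'] i).toNat (by omega)
                    ((pvFind s ['/', '/'] i).toNat - i) i out (by omega)
                    (fun j hj hjm => ⟨hminl j hj hjm,
                      fun hp => hnb (pvPrefix_infix hj hp)⟩)]
              have hsw : PySem.Chars.startswith
                  (s.drop (pvFind s ['/', '/'] i).toNat) ['/', '/'] = true :=
                (PySem.Chars.startswith_iff _ _).mpr hprel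
              rw [pvLoopA, dif_pos (by omega)]
              simp only [Bool.false_eq_true, if_false]
              rw [if_pos hsw]
              rw [if_pos (Or.inl hbc), if_neg hlc, pvSliceEq s i _ hgel]
          · obtain ⟨hgeb, hpreb, hminb⟩ := pvFind_spec s ['/', '*'] i hi hbc
            have hlen2 : (pvFind s ['/', '*'] i).toNat + 2 ≤ s.length := by
              have := hpreb.length_le
              simp [List.length_drop] at this
              omega
            by_cases hfirst : pvFind s ['/', '/'] i ≠ -1 ∧
                pvFind s ['/', '/'] i < pvFind s ['/', '*'] i
            · -- line comment strictly first: stop at lc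
              obtain ⟨hlc, hlb⟩ := hfirst
              obtain ⟨hgel, hprel, hminl⟩ := pvFind_spec s ['/', '/'] i hi hlc
              have hLB : (pvFind s ['/', '/'] i).toNat < (pvFind s ['/', '*'] i).toNat := by
                omega
              have hlen2' : (pvFind s ['/', '/'] i).toNat + 2 ≤ s.length := by
                have := hprel.length_le
                simp [List.length_drop] at this
                omega
              rw [pvCopyA s (pvFind s ['/', '/'] i).toNat (by omega)
                    ((pvFind s ['/', '/'] i).toNat - i) i out (by omega)
                    (fun j hj hjm => ⟨hminl j hj hjm, hminb j hj (by omega)⟩)]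
              have hsw : PySem.Chars.startswith
                  (s.drop (pvFind s ['/', '/'] i).toNat) ['/', '/'] = true :=
                (PySem.Chars.startswith_iff _ _).mpr hprel
              rw [pvLoopA, dif_pos (by omega)]
              simp only [Bool.false_eq_true, if_false]
              rw [if_pos hsw]
              rw [if_pos (Or.inr ⟨hlc, hlb⟩), if_neg hlc, pvSliceEq s i _ hgel]
            · -- block comment first: copy up to bc, enter the block, recurse
              have hnoL : ∀ j, i ≤ j → j < (pvFind s ['/', '*'] i).toNat →
                  ¬ ['/', '/'] <+: s.drop j := by
                intro j hj hjm hp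
                by_cases hlc : pvFind s ['/', '/'] i = -1
                · exact (pvFind_neg_iff s ['/', '/'] i hi).mp hlc (pvPrefix_infix hj hp)
                · obtain ⟨hgel, hprel, hminl⟩ := pvFind_spec s ['/', '/'] i hi hlc
                  have hble : pvFind s ['/', '*'] i ≤ pvFind s ['/', '/'] i := by
                    by_contra hcon
                    exact hfirst ⟨hlc, by omega⟩
                  exact hminl j hj (by omega) hp
              rw [pvCopyA s (pvFind s ['/', '*'] i).toNat (by omega)
                    ((pvFind s ['/', '*'] i).toNat - i) i out (by omega)
                    (fun j hj hjm => ⟨hnoL j hj hjm, hminb j hj hjm⟩)]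
              have hswL : ¬ PySem.Chars.startswith
                  (s.drop (pvFind s ['/', '*'] i).toNat) ['/', '/'] = true :=
                fun h => pvNotBoth hpreb ((PySem.Chars.startswith_iff _ _).mp h)
              have hswB : PySem.Chars.startswith
                  (s.drop (pvFind s ['/', '*'] i).toNat) ['/', '*'] = true :=
                (PySem.Chars.startswith_iff _ _).mpr hpreb
              rw [pvLoopA, dif_pos (by omega)]
              simp only [Bool.false_eq_true, if_false]
              rw [if_neg hswL, if_pos hswB]
              rw [if_neg (by
                    rintro (h | h)
                    · exact hbc h
                    · exact hfirst h)]
              rw [ih ((pvFind s ['/', '*'] i).toNat + 2) _ true (by omega),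
                  pvSliceEq s i _ hgeb]

-- ===== VERDICT (by name: the statement is the Claim_ definition above) =====
theorem strip_rust_comments_spec : Claim_equal_strip_rust_comments := by
  intro line blk _
  unfold Spec_strip_rust_comments strip_rust_comments strip_rust_comments_alt
  rw [pvLoop_eq line.toList (line.toList.length + 1) 0 [] blk (by omega)]
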